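-- pv_equiv track=rewrite | github.com/igotyabingo/codingtest | Python3/프로그래머스/2/17679. ［1차］ 프렌즈4블록/［1차］ 프렌즈4블록.py | solution
-- ===== SOURCE A (Python) =====
-- def solution(m, n, board):
--     # 매 라운드마다 board의 모든 칸을 확인한다.
--     answer = 0
--     board = board[::-1]
--
--     stack = [[0 for _ in range(m)] for _ in range(n)]
--
--     for i in range(n):
--         for j in range(m):
--             stack[i][j] = board[j][i]
--     while(True):
--         coord = set()
--         for i in range(len(stack)-1):
--             for j, alp in enumerate(stack[i][:-1]):
--                 if (i+1 < len(stack) and j+1 < len(stack[i+1])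
--                     and alp == stack[i][j+1] and alp == stack[i+1][j] and alp == stack[i+1][j+1]):
--                     coord.add((i, j))
--                     coord.add((i, j+1))
--                     coord.add((i+1, j))
--                     coord.add((i+1, j+1))
--
--         if not coord: break
--         modify(stack, coord)
--         answer += len(coord)
--
--     return answer
--
-- def modify(stack, coord):
--     index = dict()
--     for i, j in coord:
--         if i in index: index[i].append(j)
--         else: index[i] = [j]
--     for i in index:
--         index[i].sort(reverse=True)
--         for j in index[i]:
--             stack[i].pop(j)
-- ===== SOURCE B (Python) =====
-- def solution(m, n, board):
--     # Row-major bottom-up grid with a None sentinel: scan 2x2 blocks per round,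
--     # collect removed cells in a set, then rebuild each column (gravity) in place.
--     if m <= 0 or n <= 0:
--         return 0
--     flipped = board[::-1]
--     grid = [[flipped[r][c] for c in range(n)] for r in range(m)]  # grid[0] = bottom row
--     answer = 0
--     while True:
--         removed = set()
--         for r in range(m - 1):
--             for c in range(n - 1):
--                 v = grid[r][c]
--                 if v is not None and v == grid[r][c + 1] == grid[r + 1][c] == grid[r + 1][c + 1]:
--                     removed.update(((r, c), (r, c + 1), (r + 1, c), (r + 1, c + 1)))
--         if not removed:
--             return answer
--         answer += len(removed)
--         for c in range(n):
--             col = [grid[r][c] for r in range(m) if grid[r][c] is not None and (r, c) not in removed]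
--             col += [None] * (m - len(col))
--             for r in range(m):
--                 grid[r][c] = col[r]
-- ===== Notes on version B (the rewrite author's own statement) =====
-- stated objective: alternative
-- what changed: Replaces A's transposed column-list state mutated via a coordinate set grouped into a dict of descending pops with a row-major bottom-up grid using a None sentinel, a set of removed cells, and a per-column rebuild (compact + pad) for gravity.
import Mathlib
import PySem

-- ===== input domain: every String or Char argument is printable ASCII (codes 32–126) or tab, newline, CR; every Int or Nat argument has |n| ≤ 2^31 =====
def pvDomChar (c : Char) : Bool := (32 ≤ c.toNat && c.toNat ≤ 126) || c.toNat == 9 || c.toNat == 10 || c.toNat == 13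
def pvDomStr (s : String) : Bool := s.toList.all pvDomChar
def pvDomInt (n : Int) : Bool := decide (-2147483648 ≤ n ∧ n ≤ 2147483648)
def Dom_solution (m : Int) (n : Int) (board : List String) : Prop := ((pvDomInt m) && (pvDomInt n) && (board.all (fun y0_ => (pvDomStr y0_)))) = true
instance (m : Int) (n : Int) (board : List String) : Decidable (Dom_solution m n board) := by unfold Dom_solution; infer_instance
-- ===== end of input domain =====

-- B rebuilds the board as a row-major bottom-up grid with a None sentinel instead of A's
-- transposed column lists mutated by dict-grouped pops; same value, similar cost ("alternative").
-- A mutates nothing observable (it rebinds `board` locally), so return-value equivalence is the whole story.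

-- ===== PORT A =====
-- stack[i][j] = board[::-1][j][i]; the '\x00' default stands for the never-compared initial 0s
-- (under Pre_ every cell is overwritten before it is read).
def vA (boardR : List String) (j i : Int) : Char :=
  ((PySem.List.pyGet? boardR j).bind (fun s => PySem.Str.pyGet? s i)).getD '\x00'

def buildA (m n : Int) (board : List String) : List (List Char) :=
  let boardR := board.reverse   -- board[::-1]
  let stack0 := (PySem.List.pyRange 0 n 1).map (fun _ => (PySem.List.pyRange 0 m 1).map (fun _ => '\x00'))
  (PySem.List.pyRange 0 n 1).foldl (fun st i =>
    (PySem.List.pyRange 0 m 1).foldl (fun st j =>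
      PySem.List.pySetD st i (PySem.List.pySetD (PySem.List.pyGetD st i []) j (vA boardR j i))) st) stack0

def colA (st : List (List Char)) (i : Int) : List Char := PySem.List.pyGetD st i []
def chA (st : List (List Char)) (i j : Int) : Char := PySem.List.pyGetD (colA st i) j '\x00'

-- the coord set: for i in range(len(stack)-1): for j, alp in enumerate(stack[i][:-1]): …
def scanA (st : List (List Char)) : List (Int × Int) :=
  (PySem.List.pyRange 0 ((st.length : Int) - 1) 1).foldl (fun coord i =>
    (PySem.List.enumerate (PySem.List.slice (colA st i) none (some (-1))) 0).foldl (fun coord p =>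
      if i + 1 < (st.length : Int) ∧ p.1 + 1 < ((colA st (i+1)).length : Int)
          ∧ p.2 = chA st i (p.1+1) ∧ p.2 = chA st (i+1) p.1 ∧ p.2 = chA st (i+1) (p.1+1) then
        PySem.Set.add (PySem.Set.add (PySem.Set.add (PySem.Set.add coord (i, p.1)) (i, p.1+1)) (i+1, p.1)) (i+1, p.1+1)
      else coord) coord) PySem.Set.empty

-- stack[i].pop(j) (the none branch is unreachable: popped indices are always in range)
def popA (st : List (List Char)) (i j : Int) : List (List Char) :=
  match PySem.List.pop? (PySem.List.pyGetD st i []) j with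
  | some r => PySem.List.pySetD st i r.2
  | none => st

-- modify(stack, coord): 'if i in index: index[i].append(j) else: index[i] = [j]' is exactly
-- dict-modify with default []; then per key sort descending and pop.
def modifyA (st : List (List Char)) (coord : List (Int × Int)) : List (List Char) :=
  let index : PySem.Dict Int (List Int) :=
    coord.foldl (fun d p => d.modify p.1 [] (· ++ [p.2])) PySem.Dict.empty
  index.items.foldl (fun st kv =>
    (PySem.List.sorted kv.2 (fun x => x) true).foldl (fun st j => popA st kv.1 j) st) st

-- while True: …  (fuel m*n+1 ≥ rounds+1: every productive round pops at least one cell)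
def loopA : Nat → List (List Char) → Int → Int
  | 0, _, ans => ans
  | fuel+1, st, ans =>
    let coord := scanA st
    if coord = [] then ans
    else loopA fuel (modifyA st coord) (ans + (coord.length : Int))

def solution (m : Int) (n : Int) (board : List String) : Int :=
  loopA (m.toNat * n.toNat + 1) (buildA m n board) 0

-- ===== PORT B =====
def cellB (g : List (List (Option Char))) (r c : Int) : Option Char :=
  PySem.List.pyGetD (PySem.List.pyGetD g r []) c none

-- grid[r][c] = board[::-1][r][c] as Option Char; none is exactly where Python raises (outside Pre_)
def buildB (m n : Int) (board : List String) : List (List (Option Char)) :=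
  let flipped := board.reverse   -- board[::-1]
  (PySem.List.pyRange 0 m 1).map (fun r =>
    (PySem.List.pyRange 0 n 1).map (fun c =>
      (PySem.List.pyGet? flipped r).bind (fun s => PySem.Str.pyGet? s c)))

def scanB (m n : Int) (g : List (List (Option Char))) : List (Int × Int) :=
  (PySem.List.pyRange 0 (m-1) 1).foldl (fun removed r =>
    (PySem.List.pyRange 0 (n-1) 1).foldl (fun removed c =>
      let v := cellB g r c
      if v ≠ none ∧ v = cellB g r (c+1) ∧ cellB g r (c+1) = cellB g (r+1) c ∧ cellB g (r+1) c = cellB g (r+1) (c+1) then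
        PySem.Set.update removed [(r,c),(r,c+1),(r+1,c),(r+1,c+1)]
      else removed) removed) PySem.Set.empty

-- per-column compact-and-pad gravity
def gravityB (m n : Int) (removed : List (Int × Int)) (g : List (List (Option Char))) : List (List (Option Char)) :=
  (PySem.List.pyRange 0 n 1).foldl (fun g c =>
    let col0 := (PySem.List.pyRange 0 m 1).foldl (fun acc r =>
        if cellB g r c ≠ none ∧ ¬ ((r, c) ∈ removed) then acc ++ [cellB g r c] else acc) []
    let col := col0 ++ List.replicate (m - (col0.length : Int)).toNat (none : Option Char)
    (PySem.List.pyRange 0 m 1).foldl (fun g r =>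
      PySem.List.pySetD g r (PySem.List.pySetD (PySem.List.pyGetD g r []) c (PySem.List.pyGetD col r none))) g) g

def loopB (m n : Int) : Nat → List (List (Option Char)) → Int → Int
  | 0, _, ans => ans
  | fuel+1, g, ans =>
    let removed := scanB m n g
    if removed = [] then ans
    else loopB m n fuel (gravityB m n removed g) (ans + (removed.length : Int))

def solution_alt (m : Int) (n : Int) (board : List String) : Int :=
  if m ≤ 0 ∨ n ≤ 0 then 0
  else loopB m n (m.toNat * n.toNat + 1) (buildB m n board) 0

-- ===== PRECONDITION & SPEC =====
-- Pre_ is exactly A's non-raising domain: when m > 0 and n > 0, A reads board[::-1][j][i]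
-- for all j < m, i < n, so board needs at least m rows and each of its last m rows at least n chars.
def Pre_solution (m : Int) (n : Int) (board : List String) : Prop :=
  m ≤ 0 ∨ n ≤ 0 ∨ (m ≤ (board.length : Int) ∧ ∀ s ∈ board.reverse.take m.toNat, n ≤ (PySem.Str.len s : Int))
instance (m : Int) (n : Int) (board : List String) : Decidable (Pre_solution m n board) := by unfold Pre_solution; infer_instance

def pvWitness_solution : Int × Int × List String := (4, 5, ["CCBDE", "AAADE", "AAABF", "CCBBF"])

def Spec_solution (m : Int) (n : Int) (board : List String) (out : Int) : Prop := out = solution_alt m n board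
instance (m : Int) (n : Int) (board : List String) (out : Int) : Decidable (Spec_solution m n board out) := by unfold Spec_solution; infer_instance

-- ===== CLAIM (what is proved, stated in full; the proofs are below) =====
def Claim_equal_solution : Prop := ∀ (m : Int) (n : Int) (board : List String), Dom_solution m n board → Pre_solution m n board → Spec_solution m n board (solution m n board)

-- ===== LEMMAS AND PROOFS =====

-- the Nat view of a zero-based Python range
theorem pyRange0 (k : Int) : PySem.List.pyRange 0 k 1 = (List.range k.toNat).map (fun r : Nat => (r : Int)) := by
  rw [PySem.List.pyRange_one]
  simp


theorem foldl_pyRange_toNat {σ : Type} (F : σ → Int → σ) (k : Int) (init : σ) :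
    (PySem.List.pyRange 0 k 1).foldl F init
      = (List.range k.toNat).foldl (fun s r => F s ((r : Nat) : Int)) init := by
  rw [pyRange0, List.foldl_map]

-- `keep col S off`: col with the cells whose absolute index (counting from off) lies in S removed
def keep (col : List Char) (S : List Int) (off : Nat) : List Char :=
  match col with
  | [] => []
  | x :: xs => if (off : Int) ∈ S then keep xs S (off+1) else x :: keep xs S (off+1)

theorem keep_congr (col : List Char) : ∀ (S T : List Int) (off : Nat),
    (∀ k : Nat, off ≤ k → k < off + col.length → (((k : Int)) ∈ S ↔ ((k : Int)) ∈ T)) →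
    keep col S off = keep col T off := by
  induction col with
  | nil => intro S T off _; rfl
  | cons x xs ih =>
    intro S T off h
    have h0 : ((off : Int) ∈ S ↔ (off : Int) ∈ T) := h off le_rfl (by simp)
    have hrec := ih S T (off+1) (fun k hk1 hk2 => h k (by omega) (by simp at hk2 ⊢; omega))
    by_cases hm : (off : Int) ∈ S
    · simp [keep, hm, h0.mp hm, hrec]
    · have hm' : (off : Int) ∉ T := fun hx => hm (h0.mpr hx)
      simp [keep, hm, hm', hrec]

theorem keep_none (col : List Char) : ∀ (S : List Int) (off : Nat),
    (∀ s ∈ S, s < (off : Int)) → keep col S off = col := by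
  induction col with
  | nil => intro S off _; rfl
  | cons x xs ih =>
    intro S off h
    have hm : (off : Int) ∉ S := fun hx => absurd (h _ hx) (by omega)
    simp [keep, hm, ih S (off+1) (fun s hs => by have := h s hs; omega)]

theorem keep_append (a b : List Char) : ∀ (S : List Int) (off : Nat),
    keep (a ++ b) S off = keep a S off ++ keep b S (off + a.length) := by
  induction a with
  | nil => intro S off; simp [keep]
  | cons x xs ih =>
    intro S off
    have harith : off + 1 + xs.length = off + (xs.length + 1) := by omega
    by_cases hm : (off : Int) ∈ S <;> simp [keep, hm, ih S (off+1), harith]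

theorem getD_set_self {α : Type} (l : List α) (k : Nat) (v d : α) (h : k < l.length) :
    (l.set k v).getD k d = v := by
  rw [List.getD_eq_getElem _ _ (by simpa using h)]
  exact List.getElem_set_self (by simpa using h)

theorem getD_set_ne {α : Type} (l : List α) (k c : Nat) (v d : α) (h : k ≠ c) :
    (l.set k v).getD c d = l.getD c d := by
  unfold List.getD
  rw [List.getElem?_set_ne h]

theorem getD_map_range {α : Type} (f : Nat → α) (M i : Nat) (d : α) (h : i < M) :
    (((List.range M).map f).getD i d) = f i := by
  rw [List.getD_eq_getElem _ _ (by simpa using h), List.getElem_map, List.getElem_range]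

theorem getElem?_map_range {α : Type} (f : Nat → α) (M i : Nat) (h : i < M) :
    ((List.range M).map f)[i]? = some (f i) := by
  rw [List.getElem?_eq_getElem (by simpa using h), List.getElem_map, List.getElem_range]

theorem getD_drop {α : Type} (l : List α) (i j : Nat) (d : α) :
    (l.drop i).getD j d = l.getD (i+j) d := by
  rw [List.getD_eq_getElem?_getD, List.getD_eq_getElem?_getD, List.getElem?_drop]

theorem build_aux' {α : Type} (d : α) (gfun : Nat → α → α) (step : List α → Nat → List α)
    (hstep : ∀ (st : List α) (i : Nat), i < st.length → step st i = st.set i (gfun i (st.getD i d))) :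
    ∀ (K : Nat) (st0 : List α), K ≤ st0.length →
    (List.range K).foldl step st0
      = ((List.range K).map (fun i => gfun i (st0.getD i d))) ++ st0.drop K := by
  intro K
  induction K with
  | zero => intro st0 _; simp
  | succ K ih =>
    intro st0 hK
    rw [List.range_succ, List.foldl_append, List.foldl_cons, List.foldl_nil, ih st0 (by omega)]
    have hA : ((List.range K).map (fun i => gfun i (st0.getD i d))).length = K := by simp
    have hlen : (((List.range K).map (fun i => gfun i (st0.getD i d))) ++ st0.drop K).length = st0.length := by
      rw [List.length_append, hA, List.length_drop]; omega
    rw [hstep _ _ (by omega)]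
    have hgd : (((List.range K).map (fun i => gfun i (st0.getD i d))) ++ st0.drop K).getD K d = st0.getD K d := by
      rw [List.getD_append_right _ _ _ _ (by omega), hA, Nat.sub_self, getD_drop, Nat.add_zero]
    rw [hgd, List.set_append_right _ _ (by omega), hA, Nat.sub_self]
    rw [List.drop_eq_getElem_cons (by omega : K < st0.length), List.set_cons_zero]
    rw [List.map_append, List.map_singleton, List.append_assoc, List.singleton_append]

theorem hoist_setN {α β : Type} (d : α) (L : List β) (w : α → β → α) (i : Nat) :
    ∀ (st : List α), i < st.length →
    L.foldl (fun st j => st.set i (w (st.getD i d) j)) st = st.set i (L.foldl w (st.getD i d)) := by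
  induction L with
  | nil =>
    intro st hi
    rw [List.foldl_nil, List.foldl_nil, List.getD_eq_getElem _ _ hi]
    exact (List.set_getElem_self hi).symm
  | cons j L ih =>
    intro st hi
    rw [List.foldl_cons, ih _ (by rw [List.length_set]; exact hi), List.foldl_cons]
    rw [getD_set_self _ _ _ _ hi, List.set_set]

theorem rowfold_eq (v : Nat → Char) (M : Nat) (row : List Char) (hrow : row.length = M) :
    (List.range M).foldl (fun row j => row.set j (v j)) row = (List.range M).map v := by
  rw [build_aux' '\x00' (fun j _ => v j) _ (fun _ _ _ => rfl) M _ (by omega)]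
  rw [List.drop_eq_nil_of_le (by omega), List.append_nil]

-- membership in a fold of conditional set-insertions
theorem mem_foldl_iff {beta gamma : Type} (L : List beta) (F : List gamma → beta → List gamma) (Q : beta → gamma → Prop)
    (h : ∀ (s : List gamma) (b : beta) (x : gamma), b ∈ L → (x ∈ F s b ↔ x ∈ s ∨ Q b x)) :
    ∀ (s : List gamma) (x : gamma), x ∈ L.foldl F s ↔ x ∈ s ∨ ∃ b ∈ L, Q b x := by
  induction L with
  | nil => simp
  | cons b L ih =>
    intro s x
    rw [List.foldl_cons, ih (fun s b' x hb => h s b' x (by simp [hb])), h s b x (by simp)]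
    simp only [List.mem_cons]
    constructor
    · rintro ((hs | hq) | ⟨b', hb', hq⟩)
      · exact Or.inl hs
      · exact Or.inr ⟨b, Or.inl rfl, hq⟩
      · exact Or.inr ⟨b', Or.inr hb', hq⟩
    · rintro (hs | ⟨b', (rfl | hb'), hq⟩)
      · exact Or.inl (Or.inl hs)
      · exact Or.inl (Or.inr hq)
      · exact Or.inr ⟨b', hb', hq⟩

theorem nodup_foldl {beta gamma : Type} (L : List beta) (F : List gamma → beta → List gamma)
    (h : ∀ (s : List gamma) (b : beta), b ∈ L → s.Nodup → (F s b).Nodup) :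
    ∀ (s : List gamma), s.Nodup → (L.foldl F s).Nodup := by
  induction L with
  | nil => intro s hs; simpa
  | cons b L ih =>
    intro s hs
    exact ih (fun s b' hb => h s b' (by simp [hb])) _ (h s b (by simp) hs)

-- relation between A's column state and B's grid
def StRel (m n : Int) (st : List (List Char)) (g : List (List (Option Char))) : Prop :=
  st.length = n.toNat ∧ (∀ col ∈ st, col.length ≤ m.toNat) ∧
  g.length = m.toNat ∧ (∀ row ∈ g, row.length = n.toNat) ∧
  ∀ r c : Nat, r < m.toNat → c < n.toNat → (g.getD r []).getD c none = (st.getD c [])[r]?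

-- the 2×2-block predicates of the two scans
def PA (st : List (List Char)) (i j : Int) : Prop :=
  0 ≤ i ∧ 0 ≤ j ∧ i + 1 < (st.length : Int) ∧ j + 1 < ((colA st i).length : Int)
  ∧ j + 1 < ((colA st (i+1)).length : Int)
  ∧ chA st i j = chA st i (j+1) ∧ chA st i j = chA st (i+1) j ∧ chA st i j = chA st (i+1) (j+1)

def PB (m n : Int) (g : List (List (Option Char))) (r c : Int) : Prop :=
  0 ≤ r ∧ 0 ≤ c ∧ r < m - 1 ∧ c < n - 1
  ∧ cellB g r c ≠ none ∧ cellB g r c = cellB g r (c+1)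
  ∧ cellB g r (c+1) = cellB g (r+1) c ∧ cellB g (r+1) c = cellB g (r+1) (c+1)

theorem mem_addFour {α : Type} [BEq α] [LawfulBEq α] (s : List α) (C : Prop) [Decidable C] (a b c d x : α) :
    (x ∈ if C then PySem.Set.add (PySem.Set.add (PySem.Set.add (PySem.Set.add s a) b) c) d else s)
      ↔ x ∈ s ∨ (C ∧ (x = a ∨ x = b ∨ x = c ∨ x = d)) := by
  split_ifs with hC
  · simp only [PySem.Set.mem_add]; tauto
  · tauto

theorem nodup_addFour {α : Type} [BEq α] [LawfulBEq α] (s : List α) (C : Prop) [Decidable C] (a b c d : α)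
    (h : s.Nodup) :
    (if C then PySem.Set.add (PySem.Set.add (PySem.Set.add (PySem.Set.add s a) b) c) d else s).Nodup := by
  split_ifs
  · exact PySem.Set.nodup_add _ _ (PySem.Set.nodup_add _ _ (PySem.Set.nodup_add _ _ (PySem.Set.nodup_add _ _ h)))
  · exact h

theorem mem_scanA (st : List (List Char)) (x : Int × Int) :
    x ∈ scanA st ↔ ∃ i j : Int, PA st i j ∧ (x = (i,j) ∨ x = (i,j+1) ∨ x = (i+1,j) ∨ x = (i+1,j+1)) := by
  unfold scanA
  rw [mem_foldl_iff _ _ (fun i x => ∃ p ∈ PySem.List.enumerate (PySem.List.slice (colA st i) none (some (-1))) 0,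
        (i + 1 < (st.length : Int) ∧ p.1 + 1 < ((colA st (i+1)).length : Int)
          ∧ p.2 = chA st i (p.1+1) ∧ p.2 = chA st (i+1) p.1 ∧ p.2 = chA st (i+1) (p.1+1))
        ∧ (x = (i,p.1) ∨ x = (i,p.1+1) ∨ x = (i+1,p.1) ∨ x = (i+1,p.1+1)))
      (fun s i x _ => mem_foldl_iff _ _ (fun (p : Int × Char) (x : Int × Int) =>
        (i + 1 < (st.length : Int) ∧ p.1 + 1 < ((colA st (i+1)).length : Int)
          ∧ p.2 = chA st i (p.1+1) ∧ p.2 = chA st (i+1) p.1 ∧ p.2 = chA st (i+1) (p.1+1))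
        ∧ (x = (i,p.1) ∨ x = (i,p.1+1) ∨ x = (i+1,p.1) ∨ x = (i+1,p.1+1)))
        (fun s p x _ => mem_addFour _ _ _ _ _ _ _) s x)]
  constructor
  · rintro (hmem | ⟨i, hi, p, hp, hC, hx⟩)
    · simp [PySem.Set.empty] at hmem
    · rw [PySem.List.slice_to_neg_one] at hp
      rcases (PySem.List.mem_enumerate_iff _ _ _).1 hp with ⟨k, hk, rfl⟩
      obtain ⟨h1, h2, h3, h4, h5⟩ := hC
      have hklen : k < (colA st i).length := by
        have := (colA st i).length_dropLast ▸ hk; omega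
      have h0k : (0:Int) + (k:Int) = ((k : Nat) : Int) := by ring
      have hval : (colA st i).dropLast[k] = chA st i ((0:Int) + (k:Int)) := by
        rw [List.getElem_dropLast, chA, h0k, PySem.List.pyGetD_eq_getElem _ _ (by omega) (by exact_mod_cast hklen)]
        simp
      refine ⟨i, (0:Int) + (k:Int), ⟨((PySem.List.mem_pyRange_one).1 hi).1, by omega, h1, ?_, h2, ?_, ?_, ?_⟩, hx⟩
      · have := (colA st i).length_dropLast ▸ hk; omega
      · rw [← hval]; exact h3
      · rw [← hval]; exact h4
      · rw [← hval]; exact h5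
  · rintro ⟨i, j, ⟨hi0, hj0, hilen, hjlen, hjlen', he1, he2, he3⟩, hx⟩
    refine Or.inr ⟨i, ?_, ((j : Int), chA st i j), ?_, ⟨hilen, ?_, ?_, ?_, ?_⟩, ?_⟩
    · rw [PySem.List.mem_pyRange_one]; omega
    · rw [PySem.List.slice_to_neg_one, PySem.List.mem_enumerate_iff]
      have hkN : j.toNat < (colA st i).dropLast.length := by
        rw [List.length_dropLast]; omega
      refine ⟨j.toNat, hkN, ?_⟩
      have hjeq : (0 : Int) + (j.toNat : Int) = j := by omega
      have hklen : j.toNat < (colA st i).length := by omega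
      rw [List.getElem_dropLast, Prod.ext_iff]
      refine ⟨hjeq.symm, ?_⟩
      show chA st i j = (colA st i)[j.toNat]
      rw [chA, PySem.List.pyGetD_eq_getElem _ _ hj0 (by omega)]
    · exact hjlen'
    · exact he1
    · exact he2
    · exact he3
    · exact hx

theorem mem_updateFour {α : Type} [BEq α] [LawfulBEq α] (s : List α) (C : Prop) [Decidable C] (a b c d x : α) :
    (x ∈ if C then PySem.Set.update s [a,b,c,d] else s) ↔ x ∈ s ∨ (C ∧ (x = a ∨ x = b ∨ x = c ∨ x = d)) := by
  split_ifs with hC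
  · simp only [PySem.Set.mem_update, List.mem_cons, List.not_mem_nil, or_false]; tauto
  · tauto

theorem nodup_updateFour {α : Type} [BEq α] [LawfulBEq α] (s : List α) (C : Prop) [Decidable C] (a b c d : α)
    (h : s.Nodup) :
    (if C then PySem.Set.update s [a,b,c,d] else s).Nodup := by
  split_ifs
  · exact PySem.Set.nodup_update _ _ h
  · exact h

theorem mem_scanB (m n : Int) (g : List (List (Option Char))) (x : Int × Int) :
    x ∈ scanB m n g ↔ ∃ r c : Int, PB m n g r c ∧ (x = (r,c) ∨ x = (r,c+1) ∨ x = (r+1,c) ∨ x = (r+1,c+1)) := by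
  unfold scanB
  rw [mem_foldl_iff _ _ (fun r x => ∃ c ∈ PySem.List.pyRange 0 (n-1) 1,
        (cellB g r c ≠ none ∧ cellB g r c = cellB g r (c+1) ∧ cellB g r (c+1) = cellB g (r+1) c ∧ cellB g (r+1) c = cellB g (r+1) (c+1))
        ∧ (x = (r,c) ∨ x = (r,c+1) ∨ x = (r+1,c) ∨ x = (r+1,c+1)))
      (fun s r x _ => mem_foldl_iff _ _ (fun (c : Int) (x : Int × Int) =>
        (cellB g r c ≠ none ∧ cellB g r c = cellB g r (c+1) ∧ cellB g r (c+1) = cellB g (r+1) c ∧ cellB g (r+1) c = cellB g (r+1) (c+1))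
        ∧ (x = (r,c) ∨ x = (r,c+1) ∨ x = (r+1,c) ∨ x = (r+1,c+1)))
        (fun s c x _ => mem_updateFour _ _ _ _ _ _ _) s x)]
  constructor
  · rintro (hmem | ⟨r, hr, c, hc, hC, hx⟩)
    · simp [PySem.Set.empty] at hmem
    · rcases (PySem.List.mem_pyRange_one).1 hr with ⟨hr0, hr1⟩
      rcases (PySem.List.mem_pyRange_one).1 hc with ⟨hc0, hc1⟩
      exact ⟨r, c, ⟨hr0, hc0, hr1, hc1, hC.1, hC.2.1, hC.2.2.1, hC.2.2.2⟩, hx⟩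
  · rintro ⟨r, c, ⟨hr0, hc0, hr1, hc1, h1, h2, h3, h4⟩, hx⟩
    exact Or.inr ⟨r, (PySem.List.mem_pyRange_one).2 ⟨hr0, hr1⟩, c, (PySem.List.mem_pyRange_one).2 ⟨hc0, hc1⟩, ⟨h1, h2, h3, h4⟩, hx⟩

theorem nodup_scanA (st : List (List Char)) : (scanA st).Nodup := by
  unfold scanA
  exact nodup_foldl _ _ (fun s i _ hs => nodup_foldl _ _ (fun s p _ hs => nodup_addFour _ _ _ _ _ _ hs) s hs) _ (by simp [PySem.Set.empty])

theorem nodup_scanB (m n : Int) (g : List (List (Option Char))) : (scanB m n g).Nodup := by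
  unfold scanB
  exact nodup_foldl _ _ (fun s r _ hs => nodup_foldl _ _ (fun s c _ hs => nodup_updateFour _ _ _ _ _ _ hs) s hs) _ (by simp [PySem.Set.empty])

theorem colA_nonneg (st : List (List Char)) (i : Int) (hi : 0 ≤ i) :
    colA st i = st.getD i.toNat [] := by
  rw [colA, show i = ((i.toNat : Nat) : Int) from (Int.toNat_of_nonneg hi).symm,
     PySem.List.pyGetD_natCast]
  rw [Int.toNat_natCast]

theorem chA_eq (st : List (List Char)) (i j : Int) (hi : 0 ≤ i) (hj : 0 ≤ j)
    (h : j.toNat < (st.getD i.toNat []).length) :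
    chA st i j = (st.getD i.toNat [])[j.toNat] := by
  rw [chA, colA_nonneg st i hi, PySem.List.pyGetD_eq_getElem _ _ hj (by omega)]

theorem cellB_eq (m n : Int) (st : List (List Char)) (g : List (List (Option Char)))
    (h : StRel m n st g) (r c : Int) (hr : 0 ≤ r) (hc : 0 ≤ c) :
    cellB g r c = (st.getD c.toNat [])[r.toNat]? := by
  obtain ⟨hsl, hcl, hgl, hrl, hcell⟩ := h
  rw [cellB, show r = ((r.toNat : Nat) : Int) from (Int.toNat_of_nonneg hr).symm,
     show c = ((c.toNat : Nat) : Int) from (Int.toNat_of_nonneg hc).symm,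
     PySem.List.pyGetD_natCast, PySem.List.pyGetD_natCast]
  simp only [Int.toNat_natCast]
  by_cases h1 : r.toNat < m.toNat
  · by_cases h2 : c.toNat < n.toNat
    · exact hcell _ _ h1 h2
    · -- column out of range: both sides none
      have hrow : (g.getD r.toNat []).length = n.toNat := by
        rw [List.getD_eq_getElem _ _ (by omega : r.toNat < g.length)]
        exact hrl _ (List.getElem_mem _)
      rw [List.getD_eq_default _ _ (by omega), List.getD_eq_default _ _ (by omega)]
      simp
  · have hnone : (g.getD r.toNat []).getD c.toNat none = none := by
      rw [List.getD_eq_default _ _ (by omega : g.length ≤ r.toNat)]; simp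
    rw [hnone]
    by_cases h2 : c.toNat < n.toNat
    · have : (st.getD c.toNat []).length ≤ m.toNat := by
        rw [List.getD_eq_getElem _ _ (by omega : c.toNat < st.length)]
        exact hcl _ (List.getElem_mem _)
      exact (List.getElem?_eq_none (by omega)).symm
    · rw [List.getD_eq_default _ _ (by omega)]; simp

theorem PA_iff_PB (m n : Int) (st : List (List Char)) (g : List (List (Option Char)))
    (h : StRel m n st g) (i j : Int) : PA st i j ↔ PB m n g j i := by
  obtain ⟨hsl, hcl, hgl, hrl, hcell⟩ := h
  have hRel : StRel m n st g := ⟨hsl, hcl, hgl, hrl, hcell⟩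
  have hLi : ∀ k : Nat, k < st.length → (st.getD k []).length ≤ m.toNat := by
    intro k hk; rw [List.getD_eq_getElem _ _ hk]; exact hcl _ (List.getElem_mem _)
  constructor
  · rintro ⟨hi0, hj0, hilen, hjA, hjA', e1, e2, e3⟩
    rw [colA_nonneg st i hi0] at hjA
    rw [colA_nonneg st (i+1) (by omega)] at hjA'
    have hiN : i.toNat < st.length := by omega
    have hi1N : (i+1).toNat < st.length := by omega
    have hL1 := hLi _ hiN
    have hL2 := hLi _ hi1N
    have ki : j.toNat < (st.getD i.toNat []).length := by omega
    have ki' : j.toNat + 1 < (st.getD i.toNat []).length := by omega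
    have kj : j.toNat < (st.getD (i+1).toNat []).length := by omega
    have kj' : j.toNat + 1 < (st.getD (i+1).toNat []).length := by omega
    have ht1 : (j+1).toNat = j.toNat + 1 := by omega
    have c1 : cellB g j i = some ((st.getD i.toNat [])[j.toNat]) := by
      rw [cellB_eq m n st g hRel j i hj0 hi0, List.getElem?_eq_getElem ki]
    have c2 : cellB g j (i+1) = some ((st.getD (i+1).toNat [])[j.toNat]) := by
      rw [cellB_eq m n st g hRel j (i+1) hj0 (by omega), List.getElem?_eq_getElem kj]
    have c3 : cellB g (j+1) i = some ((st.getD i.toNat [])[j.toNat + 1]) := by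
      rw [cellB_eq m n st g hRel (j+1) i (by omega) hi0, ht1, List.getElem?_eq_getElem ki']
    have c4 : cellB g (j+1) (i+1) = some ((st.getD (i+1).toNat [])[j.toNat + 1]) := by
      rw [cellB_eq m n st g hRel (j+1) (i+1) (by omega) (by omega), ht1, List.getElem?_eq_getElem kj']
    have v1 : chA st i j = (st.getD i.toNat [])[j.toNat] := chA_eq st i j hi0 hj0 ki
    have v2 : chA st i (j+1) = (st.getD i.toNat [])[j.toNat + 1] := by
      rw [chA_eq st i (j+1) hi0 (by omega) (by omega)]; simp only [ht1]
    have v3 : chA st (i+1) j = (st.getD (i+1).toNat [])[j.toNat] := chA_eq st (i+1) j (by omega) hj0 kj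
    have v4 : chA st (i+1) (j+1) = (st.getD (i+1).toNat [])[j.toNat + 1] := by
      rw [chA_eq st (i+1) (j+1) (by omega) (by omega) (by omega)]; simp only [ht1]
    refine ⟨hj0, hi0, by omega, by omega, ?_, ?_, ?_, ?_⟩
    · rw [c1]; simp
    · rw [c1, c2]; exact congrArg some (by rw [← v1, ← v3]; exact e2)
    · rw [c2, c3]; exact congrArg some (by rw [← v2, ← v3]; rw [← e1, ← e2])
    · rw [c3, c4]; exact congrArg some (by rw [← v2, ← v4]; rw [← e1, ← e3])
  · rintro ⟨hj0, hi0, hjm, hin, hne, q1, q2, q3⟩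
    have hiN : i.toNat < st.length := by omega
    have hi1N : (i+1).toNat < st.length := by omega
    have ht1 : (j+1).toNat = j.toNat + 1 := by omega
    have c1 := cellB_eq m n st g hRel j i hj0 hi0
    have c2 := cellB_eq m n st g hRel j (i+1) hj0 (by omega)
    have c3 := cellB_eq m n st g hRel (j+1) i (by omega) hi0
    have c4 := cellB_eq m n st g hRel (j+1) (i+1) (by omega) (by omega)
    have hv1 : cellB g j i ≠ none := hne
    have hv2 : cellB g j (i+1) ≠ none := by rw [← q1]; exact hne
    have hv3 : cellB g (j+1) i ≠ none := by rw [← q2, ← q1]; exact hne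
    have hv4 : cellB g (j+1) (i+1) ≠ none := by rw [← q3, ← q2, ← q1]; exact hne
    have ki : j.toNat < (st.getD i.toNat []).length := by
      by_contra hcon; exact hv1 (c1.trans (List.getElem?_eq_none (by omega)))
    have ki' : j.toNat + 1 < (st.getD i.toNat []).length := by
      by_contra hcon; refine hv3 (c3.trans ?_); rw [ht1]; exact List.getElem?_eq_none (by omega)
    have kj : j.toNat < (st.getD (i+1).toNat []).length := by
      by_contra hcon; exact hv2 (c2.trans (List.getElem?_eq_none (by omega)))
    have kj' : j.toNat + 1 < (st.getD (i+1).toNat []).length := by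
      by_contra hcon; refine hv4 (c4.trans ?_); rw [ht1]; exact List.getElem?_eq_none (by omega)
    rw [c1, List.getElem?_eq_getElem ki] at q1 hv1
    rw [c2, List.getElem?_eq_getElem kj] at q1 q2
    rw [c3, ht1, List.getElem?_eq_getElem ki'] at q2 q3
    rw [c4, ht1, List.getElem?_eq_getElem kj'] at q3
    have v1 := chA_eq st i j hi0 hj0 ki
    have v2 : chA st i (j+1) = (st.getD i.toNat [])[j.toNat + 1] := by
      rw [chA_eq st i (j+1) hi0 (by omega) (by omega)]; simp only [ht1]
    have v3 := chA_eq st (i+1) j (by omega : (0:Int) ≤ i+1) hj0 kj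
    have v4 : chA st (i+1) (j+1) = (st.getD (i+1).toNat [])[j.toNat + 1] := by
      rw [chA_eq st (i+1) (j+1) (by omega) (by omega) (by omega)]; simp only [ht1]
    refine ⟨hi0, hj0, by omega, ?_, ?_, ?_, ?_, ?_⟩
    · rw [colA_nonneg st i hi0]; omega
    · rw [colA_nonneg st (i+1) (by omega)]; omega
    · rw [v1, v2]; exact Option.some.inj (q1.trans q2)
    · rw [v1, v3]; exact Option.some.inj q1
    · rw [v1, v4]; exact Option.some.inj (q1.trans (q2.trans q3))

theorem mem_scan_corr (m n : Int) (st : List (List Char)) (g : List (List (Option Char)))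
    (h : StRel m n st g) (x : Int × Int) : x ∈ scanB m n g ↔ x.swap ∈ scanA st := by
  obtain ⟨x1, x2⟩ := x
  rw [mem_scanB, mem_scanA]
  constructor
  · rintro ⟨r, c, hPB, (h'|h'|h'|h')⟩ <;> rw [Prod.mk.injEq] at h' <;>
      refine ⟨c, r, (PA_iff_PB m n st g h c r).2 hPB, ?_⟩ <;> simp [Prod.swap, h'.1, h'.2]
  · rintro ⟨i, j, hPA, (h'|h'|h'|h')⟩ <;> rw [Prod.swap, Prod.mk.injEq] at h' <;>
      refine ⟨j, i, (PA_iff_PB m n st g h i j).1 hPA, ?_⟩ <;> simp at h' <;>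
      simp only [Prod.mk.injEq] <;> tauto

theorem scanA_valid (st : List (List Char)) (p : Int × Int) (hp : p ∈ scanA st) :
    0 ≤ p.1 ∧ p.1 < (st.length : Int) ∧ 0 ≤ p.2 ∧ p.2 < ((colA st p.1).length : Int) := by
  rcases (mem_scanA st p).1 hp with ⟨i, j, ⟨hi0, hj0, hilen, hjA, hjA', _⟩, (rfl|rfl|rfl|rfl)⟩
  all_goals dsimp only
  · exact ⟨hi0, by omega, hj0, by omega⟩
  · exact ⟨hi0, by omega, by omega, by omega⟩
  · exact ⟨by omega, by omega, hj0, by omega⟩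
  · exact ⟨by omega, by omega, by omega, by omega⟩

theorem scan_len_eq (m n : Int) (st : List (List Char)) (g : List (List (Option Char)))
    (h : StRel m n st g) : (scanB m n g).length = (scanA st).length := by
  have hperm : (scanB m n g).Perm ((scanA st).map Prod.swap) := by
    rw [List.perm_ext_iff_of_nodup (nodup_scanB m n g) ((nodup_scanA st).map Prod.swap_injective)]
    intro x
    rw [mem_scan_corr m n st g h x, List.mem_map]
    constructor
    · intro hx; exact ⟨x.swap, hx, Prod.swap_swap x⟩
    · rintro ⟨a, ha, rfl⟩; rwa [Prod.swap_swap]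
  rw [hperm.length_eq, List.length_map]

theorem scan_nil_iff (m n : Int) (st : List (List Char)) (g : List (List (Option Char)))
    (h : StRel m n st g) : (scanB m n g = []) ↔ (scanA st = []) := by
  simp only [List.eq_nil_iff_forall_not_mem]
  constructor
  · intro hb y hy
    exact hb y.swap ((mem_scan_corr m n st g h y.swap).2 (by rwa [Prod.swap_swap]))
  · intro ha x hx
    exact ha x.swap ((mem_scan_corr m n st g h x).1 hx)

-- pop machinery: stack[i].pop(j) on the column level
def popCol (col : List Char) (j : Int) : List Char :=
  match PySem.List.pop? col j with
  | some r => r.2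
  | none => col

theorem popA_eq (st : List (List Char)) (k j : Int) (hk : 0 ≤ k) (hk2 : k < (st.length : Int)) :
    popA st k j = PySem.List.pySetD st k (popCol (PySem.List.pyGetD st k []) j) := by
  unfold popA popCol
  cases h : PySem.List.pop? (PySem.List.pyGetD st k []) j with
  | some r => rfl
  | none =>
    have hkN : k.toNat < st.length := by omega
    rw [PySem.List.pySetD_of_nonneg _ _ hk,
       PySem.List.pyGetD_eq_getElem _ _ hk hk2]
    exact (List.set_getElem_self hkN).symm

theorem popA_length (st : List (List Char)) (k j : Int) : (popA st k j).length = st.length := by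
  unfold popA
  cases h : PySem.List.pop? (PySem.List.pyGetD st k []) j with
  | some r => exact PySem.List.length_pySetD _ _ _
  | none => rfl

theorem popA_getD_ne (st : List (List Char)) (k : Int) (j : Int) (c : Nat)
    (hk : 0 ≤ k) (hne : k ≠ (c : Int)) : (popA st k j).getD c [] = st.getD c [] := by
  unfold popA
  cases h : PySem.List.pop? (PySem.List.pyGetD st k []) j with
  | some r =>
    show (PySem.List.pySetD st k r.2).getD c [] = st.getD c []
    rw [PySem.List.pySetD_of_nonneg _ _ hk]
    exact getD_set_ne _ _ _ _ _ (by omega)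
  | none => rfl

theorem foldpop_length (js : List Int) : ∀ (st : List (List Char)) (k : Int),
    (js.foldl (fun st j => popA st k j) st).length = st.length := by
  induction js with
  | nil => intro st k; rfl
  | cons j js ih => intro st k; rw [List.foldl_cons, ih, popA_length]

theorem foldpop_getD_ne (js : List Int) : ∀ (st : List (List Char)) (k : Int) (c : Nat),
    0 ≤ k → k ≠ (c : Int) →
    (js.foldl (fun st j => popA st k j) st).getD c [] = st.getD c [] := by
  induction js with
  | nil => intro st k c _ _; rfl
  | cons j js ih =>
    intro st k c hk hne
    rw [List.foldl_cons, ih _ _ _ hk hne, popA_getD_ne _ _ _ _ hk hne]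

theorem hoist_pops (js : List Int) : ∀ (st : List (List Char)) (k : Int), 0 ≤ k → k < (st.length : Int) →
    js.foldl (fun st j => popA st k j) st
      = PySem.List.pySetD st k (js.foldl popCol (PySem.List.pyGetD st k [])) := by
  induction js with
  | nil =>
    intro st k hk hk2
    have hkN : k.toNat < st.length := by omega
    rw [List.foldl_nil, List.foldl_nil, PySem.List.pySetD_of_nonneg _ _ hk,
       PySem.List.pyGetD_eq_getElem _ _ hk hk2]
    exact (List.set_getElem_self hkN).symm
  | cons j js ih =>
    intro st k hk hk2
    have hkN : k.toNat < st.length := by omega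
    rw [List.foldl_cons, popA_eq st k j hk hk2,
       ih _ k hk (by rw [PySem.List.length_pySetD]; exact hk2), List.foldl_cons]
    rw [show k = ((k.toNat : Nat) : Int) from (Int.toNat_of_nonneg hk).symm]
    simp only [PySem.List.pySetD_natCast, PySem.List.pyGetD_natCast]
    rw [getD_set_self _ _ _ _ hkN, List.set_set]

-- the fold over index.items
theorem items_fold_length (l : List (Int × List Int)) : ∀ (st : List (List Char)),
    (l.foldl (fun st kv => (PySem.List.sorted kv.2 (fun x => x) true).foldl (fun st j => popA st kv.1 j) st) st).length = st.length := by
  induction l with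
  | nil => intro st; rfl
  | cons q l ih => intro st; rw [List.foldl_cons, ih, foldpop_length]

theorem items_fold_notmem (l : List (Int × List Int)) : ∀ (st : List (List Char)) (c : Nat),
    ((c : Int)) ∉ l.map (fun p => p.1) → (∀ p ∈ l, 0 ≤ p.1) →
    (l.foldl (fun st kv => (PySem.List.sorted kv.2 (fun x => x) true).foldl (fun st j => popA st kv.1 j) st) st).getD c []
      = st.getD c [] := by
  induction l with
  | nil => intro st c _ _; rfl
  | cons q l ih =>
    intro st c hmem h0
    rw [List.foldl_cons, ih _ _ (fun hx => hmem (by simp [hx])) (fun p hp => h0 p (by simp [hp])),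
       foldpop_getD_ne _ _ _ _ (h0 q (by simp)) (fun he => hmem (by simp [he]))]

theorem items_fold_getD (l : List (Int × List Int)) : ∀ (st : List (List Char)) (c : Nat),
    (l.map (fun p => p.1)).Nodup → (∀ p ∈ l, 0 ≤ p.1) → c < st.length →
    (l.foldl (fun st kv => (PySem.List.sorted kv.2 (fun x => x) true).foldl (fun st j => popA st kv.1 j) st) st).getD c []
      = match l.find? (fun p => p.1 == (c : Int)) with
        | some p => (PySem.List.sorted p.2 (fun x => x) true).foldl popCol (st.getD c [])
        | none => st.getD c [] := by
  induction l with
  | nil => intro st c _ _ _; rfl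
  | cons q l ih =>
    intro st c hnd h0 hc
    have hq0 : 0 ≤ q.1 := h0 q (by simp)
    by_cases hq : q.1 = (c : Int)
    · rw [List.foldl_cons, List.find?_cons_of_pos (by simpa using hq)]
      have hnd' : (q.1 :: l.map (fun p => p.1)).Nodup := by simpa using hnd
      have hrest : ((c : Int)) ∉ l.map (fun p => p.1) := by
        have := (List.nodup_cons.1 hnd').1
        rwa [hq] at this
      rw [items_fold_notmem _ _ _ hrest (fun p hp => h0 p (by simp [hp]))]
      rw [hoist_pops _ st q.1 hq0 (by omega)]
      rw [show q.1 = ((c : Nat) : Int) from hq]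
      simp only [PySem.List.pySetD_natCast, PySem.List.pyGetD_natCast]
      rw [getD_set_self _ _ _ _ hc]
    · rw [List.foldl_cons, List.find?_cons_of_neg (by simpa using hq)]
      have hnd' : (q.1 :: l.map (fun p => p.1)).Nodup := by simpa using hnd
      rw [ih _ c ((List.nodup_cons.1 hnd').2) (fun p hp => h0 p (by simp [hp]))
           (by rw [foldpop_length]; exact hc)]
      cases hf : l.find? (fun p => p.1 == (c : Int)) with
      | some p => simp only; rw [foldpop_getD_ne _ _ _ _ hq0 hq]
      | none => simp only; rw [foldpop_getD_ne _ _ _ _ hq0 hq]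

theorem keep_erase (pre suf : List Char) (x : Char) (S : List Int)
    (hS : ∀ s ∈ S, 0 ≤ s ∧ s < (pre.length : Int)) :
    keep (pre ++ suf) S 0 = keep (pre ++ x :: suf) (((pre.length : Nat) : Int) :: S) 0 := by
  rw [keep_append, keep_append]
  have h1 : keep pre S 0 = keep pre (((pre.length : Nat) : Int) :: S) 0 := by
    apply keep_congr
    intro k _ hk
    simp only [List.mem_cons]
    constructor
    · exact Or.inr
    · rintro (he | hm)
      · exfalso; omega
      · exact hm
  have h2 : keep suf S (0 + pre.length) = suf :=
    keep_none _ _ _ (fun s hs => by have := hS s hs; omega)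
  have h3 : keep (x :: suf) (((pre.length : Nat) : Int) :: S) (0 + pre.length) = suf := by
    show keep (x :: suf) _ _ = suf
    rw [keep]
    rw [if_pos (by simp)]
    exact keep_none _ _ _ (fun s hs => by
      rcases List.mem_cons.1 hs with rfl | hm
      · omega
      · have := hS s hm; omega)
  rw [h1, h2, h3]

theorem popSeq_desc : ∀ (D : List Int) (col : List Char), D.Pairwise (· > ·) →
    (∀ j ∈ D, 0 ≤ j ∧ j < (col.length : Int)) → D.foldl popCol col = keep col D 0 := by
  intro D
  induction D with
  | nil => intro col _ _; exact (keep_none col [] 0 (by simp)).symm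
  | cons j D ih =>
    intro col hpw hval
    obtain ⟨hj0, hjlen⟩ := hval j (List.mem_cons_self)
    have hjN : j.toNat < col.length := by omega
    have hpop : popCol col j = col.eraseIdx j.toNat := by
      unfold popCol
      rw [show j = ((j.toNat : Nat) : Int) from (Int.toNat_of_nonneg hj0).symm, Int.toNat_natCast,
         PySem.List.pop?_natCast _ _ hjN]
    have hDlt : ∀ s ∈ D, 0 ≤ s ∧ s < (j.toNat : Int) := by
      intro s hs
      have h1 := (List.pairwise_cons.1 hpw).1 s hs
      have h2 := hval s (List.mem_cons_of_mem _ hs)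
      exact ⟨h2.1, by omega⟩
    rw [List.foldl_cons, hpop, ih _ hpw.of_cons ?hv]
    case hv =>
      intro s hs
      have := hDlt s hs
      rw [List.length_eraseIdx_of_lt hjN]
      constructor
      · exact this.1
      · omega
    rw [List.eraseIdx_eq_take_drop_succ]
    have htake : (col.take j.toNat).length = j.toNat := by rw [List.length_take]; omega
    have hrw := keep_erase (col.take j.toNat) (col.drop (j.toNat+1)) col[j.toNat] D (by rw [htake]; exact hDlt)
    rw [htake] at hrw
    rw [hrw]
    have hcol : col.take j.toNat ++ col[j.toNat] :: col.drop (j.toNat+1) = col := by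
      rw [← List.drop_eq_getElem_cons hjN, List.take_append_drop]
    rw [hcol, show ((j.toNat : Nat) : Int) = j from Int.toNat_of_nonneg hj0]

theorem sorted_foldpop (js : List Int) (col : List Char) (hnd : js.Nodup)
    (hval : ∀ j ∈ js, 0 ≤ j ∧ j < (col.length : Int)) :
    (PySem.List.sorted js (fun x => x) true).foldl popCol col = keep col js 0 := by
  have hperm : (PySem.List.sorted js (fun x => x) true).Perm js := PySem.List.sorted_perm _ _ _
  have hpw : (PySem.List.sorted js (fun x => x) true).Pairwise (fun a b => b ≤ a) :=
    PySem.List.sorted_pairwise_rev _ _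
  have hnd' : (PySem.List.sorted js (fun x => x) true).Nodup := hperm.nodup_iff.2 hnd
  have hpw' : (PySem.List.sorted js (fun x => x) true).Pairwise (· > ·) := by
    have := hpw.and hnd'
    exact this.imp (fun {a b} h => by
      rcases h with ⟨hle, hne⟩
      omega)
  rw [popSeq_desc _ _ hpw' (fun j hj => hval j (hperm.mem_iff.1 hj))]
  apply keep_congr
  intro k _ _
  exact ⟨fun h => hperm.mem_iff.1 h, fun h => hperm.mem_iff.2 h⟩

-- A's modify: column c becomes `keep` of its removed heights
theorem modifyA_length (st : List (List Char)) (coord : List (Int × Int)) :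
    (modifyA st coord).length = st.length := by
  unfold modifyA
  exact items_fold_length _ _

theorem nodup_group (coord : List (Int × Int)) (c : Int) (h : coord.Nodup) :
    ((coord.filter (fun p => p.1 == c)).map (fun p => p.2)).Nodup := by
  refine List.Nodup.map_on ?_ (h.filter _)
  intro x hx y hy hxy
  have hx1 : x.1 = c := by simpa using (List.mem_filter.1 hx).2
  have hy1 : y.1 = c := by simpa using (List.mem_filter.1 hy).2
  exact Prod.ext (hx1.trans hy1.symm) hxy

theorem modifyA_col (st : List (List Char)) (coord : List (Int × Int))
    (hnd : coord.Nodup)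
    (hval : ∀ p ∈ coord, 0 ≤ p.1 ∧ p.1 < (st.length : Int) ∧ 0 ≤ p.2 ∧ p.2 < ((colA st p.1).length : Int))
    (c : Nat) (hc : c < st.length) :
    (modifyA st coord).getD c [] =
      keep (st.getD c []) ((coord.filter (fun p => p.1 == (c : Int))).map (·.2)) 0 := by
  unfold modifyA
  set d := coord.foldl (fun d p => d.modify p.1 [] (· ++ [p.2])) PySem.Dict.empty with hd
  have hkeys : d.keys = PySem.Set.ofList (coord.map (fun p => p.1)) := by
    rw [hd, PySem.Dict.keys_foldl_modify_key]
    simp [PySem.Set.update_nil_left]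
  have hndk : d.keys.Nodup := by
    rw [hd]
    exact PySem.Dict.nodup_keys_foldl_modify_key _ _ _ _ _ (by simp)
  have hgetD : ∀ k : Int, d.getD k [] = (coord.filter (fun p => p.1 == k)).map (fun p => p.2) := by
    intro k
    rw [hd, PySem.Dict.getD_foldl_modify_append]
    simp
  rw [items_fold_getD d.items st c ?hnodup ?h0 hc]
  case hnodup =>
    have : d.keys = d.items.map (fun p => p.1) := rfl
    rwa [this] at hndk
  case h0 =>
    intro p hp
    have hk : p.1 ∈ d.keys := by
      show p.1 ∈ d.items.map (fun p => p.1)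
      exact List.mem_map.2 ⟨p, hp, rfl⟩
    rw [hkeys] at hk
    rcases List.mem_map.1 ((PySem.Set.mem_ofList _ _).1 hk) with ⟨q, hq, he⟩
    rw [← he]
    exact (hval q hq).1
  cases hf : d.items.find? (fun p => p.1 == (c : Int)) with
  | none =>
    simp only
    have hnomem : ((c : Int)) ∉ coord.map (fun p => p.1) := by
      intro hmem
      have hkmem : (c : Int) ∈ d.keys := by
        rw [hkeys]; exact (PySem.Set.mem_ofList _ _).2 hmem
      have : ∃ p ∈ d.items, p.1 = (c : Int) := by
        have : (c : Int) ∈ d.items.map (fun p => p.1) := hkmem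
        rcases List.mem_map.1 this with ⟨p, hp, he⟩
        exact ⟨p, hp, he⟩
      rcases this with ⟨p, hp, hpe⟩
      have := List.find?_eq_none.1 hf p hp
      simp [hpe] at this
    have hfilter : coord.filter (fun p => p.1 == (c : Int)) = [] := by
      rw [List.filter_eq_nil_iff]
      intro p hp hpe
      exact hnomem (List.mem_map.2 ⟨p, hp, by simpa using hpe⟩)
    rw [hfilter]
    exact (keep_none _ _ _ (by simp)).symm
  | some p =>
    simp only
    have hp := List.mem_of_find?_eq_some hf
    have hpe : p.1 = (c : Int) := by simpa using (List.find?_some hf)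
    have hpv : p.2 = (coord.filter (fun q => q.1 == (c : Int))).map (fun q => q.2) := by
      have hg := PySem.Dict.getD_of_mem_items d hp hndk []
      rw [hpe] at hg
      rw [← hg, hgetD]
    rw [hpv]
    apply sorted_foldpop
    · exact nodup_group coord _ hnd
    · intro j hj
      rcases List.mem_map.1 hj with ⟨q, hq, rfl⟩
      have hqf := List.mem_filter.1 hq
      have hv := hval q hqf.1
      have hq1 : q.1 = (c : Int) := by simpa using hqf.2
      refine ⟨hv.2.2.1, ?_⟩
      have hlt := hv.2.2.2
      rwa [hq1, colA_nonneg st _ (by omega), Int.toNat_natCast] at hlt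

-- B's per-column gravity pieces
def bcol0 (m : Int) (removed : List (Int × Int)) (g2 : List (List (Option Char))) (c : Int) : List (Option Char) :=
  (PySem.List.pyRange 0 m 1).foldl (fun acc r => if cellB g2 r c ≠ none ∧ ¬ ((r, c) ∈ removed) then acc ++ [cellB g2 r c] else acc) []

def bcol (m : Int) (removed : List (Int × Int)) (g2 : List (List (Option Char))) (c : Int) : List (Option Char) :=
  bcol0 m removed g2 c ++ List.replicate (m - ((bcol0 m removed g2 c).length : Int)).toNat none

def bwrite (m : Int) (g2 : List (List (Option Char))) (c : Int) (col : List (Option Char)) : List (List (Option Char)) :=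
  (PySem.List.pyRange 0 m 1).foldl (fun g r => PySem.List.pySetD g r (PySem.List.pySetD (PySem.List.pyGetD g r []) c (PySem.List.pyGetD col r none))) g2

def grp (coord : List (Int × Int)) (c : Nat) : List Int :=
  (coord.filter (fun p => p.1 == (c : Int))).map (·.2)

theorem gravityB_eq (m n : Int) (removed : List (Int × Int)) (g : List (List (Option Char))) :
    gravityB m n removed g
      = (PySem.List.pyRange 0 n 1).foldl (fun g2 c => bwrite m g2 c (bcol m removed g2 c)) g := rfl

theorem mem_grp (coord : List (Int × Int)) (c : Nat) (j : Int) :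
    j ∈ grp coord c ↔ ((c : Int), j) ∈ coord := by
  unfold grp
  constructor
  · intro hm
    rcases List.mem_map.1 hm with ⟨q, hq, rfl⟩
    rcases List.mem_filter.1 hq with ⟨hqc, hqe⟩
    have hq1 : q.1 = (c : Int) := by simpa using hqe
    rw [show ((c : Int), q.2) = q from by rw [← hq1]]
    exact hqc
  · intro hm
    exact List.mem_map.2 ⟨((c : Int), j), List.mem_filter.2 ⟨hm, by simp⟩, rfl⟩

theorem keep_length_le (col : List Char) : ∀ (S : List Int) (off : Nat), (keep col S off).length ≤ col.length := by
  induction col with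
  | nil => intro S off; exact Nat.le_refl 0
  | cons x xs ih =>
    intro S off
    have hrec := ih S (off+1)
    by_cases hm : (off : Int) ∈ S
    · simp only [keep, if_pos hm, List.length_cons]
      omega
    · simp only [keep, if_neg hm, List.length_cons]
      omega

theorem keep_eq_range (d : Char) (col : List Char) (S : List Int) : ∀ (off : Nat),
    keep col S off
      = ((List.range' off col.length).filter (fun rN : Nat => decide (¬ (((rN : Nat) : Int) ∈ S)))).map
          (fun rN : Nat => col.getD (rN - off) d) := by
  induction col with
  | nil => intro off; simp [keep]
  | cons x xs ih =>
    intro off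
    rw [show (x :: xs).length = xs.length + 1 from rfl, List.range'_succ, List.filter_cons]
    by_cases hm : (off : Int) ∈ S
    · rw [keep, if_pos hm, if_neg (by simpa using hm)]
      rw [ih (off+1)]
      apply List.map_congr_left
      intro rN hrN
      have hge : off + 1 ≤ rN := (List.mem_range'_1.1 (List.mem_of_mem_filter hrN)).1
      have : rN - off = (rN - (off+1)) + 1 := by omega
      rw [this, List.getD_cons_succ]
    · rw [keep, if_neg hm, if_pos (by simpa using hm)]
      rw [ih (off+1), List.map_cons, Nat.sub_self, List.getD_cons_zero]
      congr 1
      apply List.map_congr_left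
      intro rN hrN
      have hge : off + 1 ≤ rN := (List.mem_range'_1.1 (List.mem_of_mem_filter hrN)).1
      have : rN - off = (rN - (off+1)) + 1 := by omega
      rw [this, List.getD_cons_succ]

theorem foldl_append_ifP {α β : Type} (p : α → Prop) [DecidablePred p] (f : α → β) (l : List α) (acc : List β) :
    l.foldl (fun acc x => if p x then acc ++ [f x] else acc) acc
      = acc ++ (l.filter (fun x => decide (p x))).map f := by
  rw [PySem.List.foldl_congr_mem l _ (fun acc x => if decide (p x) = true then acc ++ [f x] else acc) acc
      (fun acc x _ => by simp), PySem.List.foldl_append_if]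

theorem kept_eq_keep (d : Char) (M : Nat) (col : List Char) (S : List Int) (hcol : col.length ≤ M) :
    ((List.range M).filter (fun rN : Nat => decide (¬ (col[rN]? = none) ∧ ¬ (((rN : Nat) : Int) ∈ S)))).map (fun rN : Nat => col[rN]?)
      = (keep col S 0).map some := by
  rw [List.range_eq_range', show M = col.length + (M - col.length) from by omega, ← List.range'_append]
  simp only [Nat.one_mul, Nat.zero_add]
  rw [List.filter_append, List.map_append]
  have h2 : (List.range' col.length (M - col.length)).filter (fun rN : Nat => decide (¬ (col[rN]? = none) ∧ ¬ (((rN : Nat) : Int) ∈ S))) = [] := by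
    rw [List.filter_eq_nil_iff]
    intro rN hrN
    have hge := (List.mem_range'_1.1 hrN).1
    simp [List.getElem?_eq_none (show col.length ≤ rN from hge)]
  rw [h2, List.map_nil, List.append_nil]
  rw [keep_eq_range d col S 0, List.map_map]
  have h3 : (List.range' 0 col.length).filter (fun rN : Nat => decide (¬ (col[rN]? = none) ∧ ¬ (((rN : Nat) : Int) ∈ S)))
      = (List.range' 0 col.length).filter (fun rN : Nat => decide (¬ (((rN : Nat) : Int) ∈ S))) := by
    apply List.filter_congr
    intro rN hrN
    have hlt : rN < col.length := by have := (List.mem_range'_1.1 hrN).2; omega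
    simp [List.getElem?_eq_getElem hlt]
  rw [h3]
  apply List.map_congr_left
  intro rN hrN
  have hlt : rN < col.length := by
    have := (List.mem_range'_1.1 (List.mem_of_mem_filter hrN)).2; omega
  rw [List.getElem?_eq_getElem hlt, Function.comp_apply, Nat.sub_zero,
     List.getD_eq_getElem _ _ hlt]

theorem cell_col_view (m : Int) (g2 : List (List (Option Char))) (col : List Char) (cN : Nat)
    (hg2 : g2.length = m.toNat) (hcol : col.length ≤ m.toNat)
    (hcell : ∀ rN : Nat, rN < m.toNat → (g2.getD rN []).getD cN none = col[rN]?) :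
    ∀ r : Int, 0 ≤ r → cellB g2 r ((cN : Nat) : Int) = col[r.toNat]? := by
  intro r hr
  rw [cellB, show r = ((r.toNat : Nat) : Int) from (Int.toNat_of_nonneg hr).symm,
     PySem.List.pyGetD_natCast, PySem.List.pyGetD_natCast]
  simp only [Int.toNat_natCast]
  by_cases h1 : r.toNat < m.toNat
  · exact hcell _ h1
  · have hrow : g2.getD r.toNat [] = [] := List.getD_eq_default _ _ (by omega)
    rw [hrow]
    exact (List.getElem?_eq_none (by omega)).symm

theorem bcol0_spec (m : Int) (removed : List (Int × Int)) (g2 : List (List (Option Char)))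
    (col : List Char) (S : List Int) (cN : Nat) (hcol : col.length ≤ m.toNat)
    (hview : ∀ r : Int, 0 ≤ r → cellB g2 r ((cN : Nat) : Int) = col[r.toNat]?)
    (hmem : ∀ rN : Nat, ((((rN : Nat) : Int), ((cN : Nat) : Int)) ∈ removed) ↔ ((rN : Nat) : Int) ∈ S) :
    bcol0 m removed g2 ((cN : Nat) : Int) = (keep col S 0).map some := by
  unfold bcol0
  rw [foldl_pyRange_toNat]
  rw [foldl_append_ifP (fun rN : Nat => cellB g2 ((rN : Nat) : Int) ((cN : Nat) : Int) ≠ none ∧ ¬ ((((rN : Nat) : Int), ((cN : Nat) : Int)) ∈ removed))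
      (fun rN : Nat => cellB g2 ((rN : Nat) : Int) ((cN : Nat) : Int)), List.nil_append]
  have hfilter : (List.range m.toNat).filter
        (fun rN => decide (cellB g2 ((rN : Nat) : Int) ((cN : Nat) : Int) ≠ none ∧ ¬ ((((rN : Nat) : Int), ((cN : Nat) : Int)) ∈ removed)))
      = (List.range m.toNat).filter (fun rN : Nat => decide (¬ (col[rN]? = none) ∧ ¬ (((rN : Nat) : Int) ∈ S))) := by
    apply List.filter_congr
    intro rN _
    rw [decide_eq_decide]
    rw [hview ((rN : Nat) : Int) (Int.natCast_nonneg rN), Int.toNat_natCast, hmem rN]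
  rw [hfilter]
  rw [List.map_congr_left (fun rN _ => by
    rw [hview ((rN : Nat) : Int) (Int.natCast_nonneg rN), Int.toNat_natCast])]
  exact kept_eq_keep 'a' m.toNat col S hcol

theorem bcol_getD (m : Int) (removed : List (Int × Int)) (g2 : List (List (Option Char)))
    (col : List Char) (S : List Int) (cN : Nat)
    (h0 : bcol0 m removed g2 ((cN : Nat) : Int) = (keep col S 0).map some)
    (hkl : col.length ≤ m.toNat) :
    ((bcol m removed g2 ((cN : Nat) : Int)).length = m.toNat)
    ∧ (∀ rN : Nat, rN < m.toNat → (bcol m removed g2 ((cN : Nat) : Int)).getD rN none = (keep col S 0)[rN]?) := by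
  have hkeep : (keep col S 0).length ≤ m.toNat := le_trans (keep_length_le col S 0) hkl
  have hlen0 : (bcol0 m removed g2 ((cN : Nat) : Int)).length = (keep col S 0).length := by
    rw [h0, List.length_map]
  constructor
  · unfold bcol
    rw [List.length_append, List.length_replicate, hlen0]
    omega
  · intro rN hrN
    unfold bcol
    by_cases hr : rN < (keep col S 0).length
    · rw [List.getD_append _ _ _ _ (by omega), h0, List.getD_eq_getElem _ _ (by simpa using hr),
         List.getElem_map, List.getElem?_eq_getElem hr]
    · rw [List.getD_append_right _ _ _ _ (by omega), List.getElem?_eq_none (by omega)]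
      rw [List.getD_eq_getElem?_getD]
      cases hrep : (List.replicate (m - ((bcol0 m removed g2 ((cN : Nat) : Int)).length : Int)).toNat (none : Option Char))[rN - (bcol0 m removed g2 ((cN : Nat) : Int)).length]? with
      | none => rfl
      | some v =>
        have := List.mem_of_getElem? hrep
        rw [List.eq_of_mem_replicate this]
        rfl

theorem bwrite_spec (m n : Int) (g2 : List (List (Option Char))) (cN : Nat) (col : List (Option Char))
    (hg2 : g2.length = m.toNat) (hrows : ∀ row ∈ g2, row.length = n.toNat) :
    ((bwrite m g2 ((cN : Nat) : Int) col).length = m.toNat)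
    ∧ (∀ row ∈ bwrite m g2 ((cN : Nat) : Int) col, row.length = n.toNat)
    ∧ (∀ rN : Nat, rN < m.toNat → ∀ c' : Nat, c' < n.toNat →
        ((bwrite m g2 ((cN : Nat) : Int) col).getD rN []).getD c' none
          = if c' = cN then col.getD rN none else (g2.getD rN []).getD c' none) := by
  unfold bwrite
  rw [foldl_pyRange_toNat]
  have hconv : ∀ (g3 : List (List (Option Char))) (rN : Nat),
      PySem.List.pySetD g3 ((rN : Nat) : Int) (PySem.List.pySetD (PySem.List.pyGetD g3 ((rN : Nat) : Int) []) ((cN : Nat) : Int) (PySem.List.pyGetD col ((rN : Nat) : Int) none))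
        = g3.set rN ((g3.getD rN []).set cN (col.getD rN none)) := by
    intro g3 rN
    rw [PySem.List.pySetD_natCast, PySem.List.pySetD_natCast, PySem.List.pyGetD_natCast, PySem.List.pyGetD_natCast]
  rw [PySem.List.foldl_congr_mem _ _ (fun g3 rN => g3.set rN ((g3.getD rN []).set cN (col.getD rN none))) _ (fun g3 rN _ => hconv g3 rN)]
  rw [build_aux' ([] : List (Option Char)) (fun rN row => row.set cN (col.getD rN none)) _ (fun _ _ _ => rfl) m.toNat g2 (by omega)]
  rw [List.drop_eq_nil_of_le (by omega), List.append_nil]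
  refine ⟨by simp, ?_, ?_⟩
  · intro row hrow
    rcases List.mem_map.1 hrow with ⟨rN, hrN, rfl⟩
    rw [List.length_set]
    have hrN' : rN < g2.length := by have := List.mem_range.1 hrN; omega
    rw [List.getD_eq_getElem _ _ hrN']
    exact hrows _ (List.getElem_mem _)
  · intro rN hrN c' hc'
    rw [getD_map_range _ _ _ _ hrN]
    by_cases he : c' = cN
    · rw [if_pos he, he]
      have hrowlen : (g2.getD rN []).length = n.toNat := by
        rw [List.getD_eq_getElem _ _ (by omega)]
        exact hrows _ (List.getElem_mem _)
      exact getD_set_self _ _ _ _ (by omega)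
    · rw [if_neg he]
      exact getD_set_ne _ _ _ _ _ (fun hh => he hh.symm)

-- round correspondence: gravity re-establishes Rel
theorem gravity_aux (m n : Int) (st : List (List Char)) (g : List (List (Option Char)))
    (h : StRel m n st g) :
    ∀ (K : Nat), K ≤ n.toNat →
      (((List.range K).foldl (fun g2 cN => bwrite m g2 ((cN : Nat) : Int) (bcol m (scanB m n g) g2 ((cN : Nat) : Int))) g).length = m.toNat)
      ∧ (∀ row ∈ (List.range K).foldl (fun g2 cN => bwrite m g2 ((cN : Nat) : Int) (bcol m (scanB m n g) g2 ((cN : Nat) : Int))) g, row.length = n.toNat)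
      ∧ (∀ rN cN : Nat, rN < m.toNat → cN < n.toNat →
          ((((List.range K).foldl (fun g2 cN => bwrite m g2 ((cN : Nat) : Int) (bcol m (scanB m n g) g2 ((cN : Nat) : Int))) g).getD rN []).getD cN none)
            = if cN < K then (keep (st.getD cN []) (grp (scanA st) cN) 0)[rN]? else ((g.getD rN []).getD cN none)) := by
  intro K
  induction K with
  | zero =>
    intro _
    refine ⟨h.2.2.1, h.2.2.2.1, ?_⟩
    intro rN cN hr hc
    simp
  | succ K ih =>
    intro hK
    obtain ⟨ihl, ihr, ihc⟩ := ih (by omega)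
    rw [List.range_succ, List.foldl_append, List.foldl_cons, List.foldl_nil]
    set gK := (List.range K).foldl (fun g2 cN => bwrite m g2 ((cN : Nat) : Int) (bcol m (scanB m n g) g2 ((cN : Nat) : Int))) g with hgK
    have hKn : K < n.toNat := by omega
    have hKst : K < st.length := by rw [h.1]; omega
    have hcolK : (st.getD K []).length ≤ m.toNat := by
      rw [List.getD_eq_getElem _ _ hKst]
      exact h.2.1 _ (List.getElem_mem _)
    have hcellK : ∀ rN : Nat, rN < m.toNat → (gK.getD rN []).getD K none = (st.getD K [])[rN]? := by
      intro rN hrN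
      rw [ihc rN K hrN hKn, if_neg (by omega)]
      exact h.2.2.2.2 rN K hrN hKn
    have hview := cell_col_view m gK (st.getD K []) K ihl hcolK hcellK
    have hmem : ∀ rN : Nat, ((((rN : Nat) : Int), ((K : Nat) : Int)) ∈ scanB m n g) ↔ ((rN : Nat) : Int) ∈ grp (scanA st) K := by
      intro rN
      rw [mem_scan_corr m n st g h (((rN : Nat) : Int), ((K : Nat) : Int))]
      exact (mem_grp (scanA st) K ((rN : Nat) : Int)).symm
    have hb0 := bcol0_spec m (scanB m n g) gK (st.getD K []) (grp (scanA st) K) K hcolK hview hmem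
    obtain ⟨hbl, hbg⟩ := bcol_getD m (scanB m n g) gK (st.getD K []) (grp (scanA st) K) K hb0 hcolK
    obtain ⟨hwl, hwr, hwc⟩ := bwrite_spec m n gK K (bcol m (scanB m n g) gK ((K : Nat) : Int)) ihl ihr
    refine ⟨hwl, hwr, ?_⟩
    intro rN cN hr hc
    rw [hwc rN hr cN hc]
    by_cases he : cN = K
    · rw [if_pos he, if_pos (by omega), he]
      exact hbg rN hr
    · rw [if_neg he, ihc rN cN hr hc]
      by_cases hlt : cN < K
      · rw [if_pos hlt, if_pos (by omega)]
      · rw [if_neg hlt, if_neg (by omega)]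

theorem gravity_rel (m n : Int) (st : List (List Char)) (g : List (List (Option Char)))
    (h : StRel m n st g) :
    StRel m n (modifyA st (scanA st)) (gravityB m n (scanB m n g) g) := by
  have hgrid : gravityB m n (scanB m n g) g
      = (List.range n.toNat).foldl (fun g2 cN => bwrite m g2 ((cN : Nat) : Int) (bcol m (scanB m n g) g2 ((cN : Nat) : Int))) g := by
    rw [gravityB_eq, foldl_pyRange_toNat]
  obtain ⟨hl, hr, hc⟩ := gravity_aux m n st g h n.toNat (le_refl _)
  rw [hgrid]
  refine ⟨?_, ?_, hl, hr, ?_⟩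
  · rw [modifyA_length]; exact h.1
  · intro col hcol
    rcases List.mem_iff_getElem.1 hcol with ⟨k, hk, rfl⟩
    have hklen : k < st.length := by rw [modifyA_length] at hk; exact hk
    rw [← List.getD_eq_getElem _ _ hk]
    rw [modifyA_col st (scanA st) (nodup_scanA st) (fun p hp => scanA_valid st p hp) k hklen]
    refine le_trans (keep_length_le _ _ _) ?_
    rw [List.getD_eq_getElem _ _ hklen]
    exact h.2.1 _ (List.getElem_mem _)
  · intro rN cN hrN hcN
    have hcc := hc rN cN hrN hcN
    rw [if_pos hcN] at hcc
    rw [hcc]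
    have hcst : cN < st.length := by rw [h.1]; omega
    rw [modifyA_col st (scanA st) (nodup_scanA st) (fun p hp => scanA_valid st p hp) cN hcst]
    rfl

theorem buildA_eq (m n : Int) (board : List String) :
    buildA m n board
      = (List.range n.toNat).map (fun i =>
          (List.range m.toNat).map (fun j => vA board.reverse ((j : Nat) : Int) ((i : Nat) : Int))) := by
  unfold buildA
  simp only [pyRange0, List.foldl_map]
  rw [build_aux' ([] : List Char)
      (fun i row => (List.range m.toNat).foldl (fun row j => row.set j (vA board.reverse ((j : Nat) : Int) ((i : Nat) : Int))) row)
      _ ?hstep n.toNat _ (by simp)]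
  case hstep =>
    intro st i hi
    simp only [PySem.List.pySetD_natCast, PySem.List.pyGetD_natCast]
    exact hoist_setN [] (List.range m.toNat)
      (fun row j => row.set j (vA board.reverse ((j : Nat) : Int) ((i : Nat) : Int))) i st hi
  rw [List.drop_eq_nil_of_le (by simp), List.append_nil]
  apply List.map_congr_left
  intro i hi
  have hi' : i < n.toNat := List.mem_range.1 hi
  refine rowfold_eq _ _ _ ?_
  rw [List.getD_eq_getElem _ _ (by simpa using hi')]
  simp

theorem buildB_eq (m n : Int) (board : List String) :
    buildB m n board
      = (List.range m.toNat).map (fun r =>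
          (List.range n.toNat).map (fun c =>
            (PySem.List.pyGet? board.reverse ((r : Nat) : Int)).bind
              (fun s => PySem.Str.pyGet? s ((c : Nat) : Int)))) := by
  unfold buildB
  simp only [pyRange0, List.map_map]
  rfl

theorem init_rel (m n : Int) (board : List String) (hpre : Pre_solution m n board) :
    StRel m n (buildA m n board) (buildB m n board) := by
  rw [buildA_eq, buildB_eq]
  refine ⟨by simp, ?_, by simp, ?_, ?_⟩
  · intro col hcol
    rcases List.mem_map.1 hcol with ⟨i, _, rfl⟩
    simp
  · intro row hrow
    rcases List.mem_map.1 hrow with ⟨r, _, rfl⟩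
    simp
  · intro r c hr hc
    have hm : 0 < m := by omega
    have hn : 0 < n := by omega
    rcases hpre with hmn | hmn | ⟨hb, hrows⟩
    · omega
    · omega
    have hblen : r < board.reverse.length := by rw [List.length_reverse]; omega
    have hs : board.reverse[r] ∈ board.reverse.take m.toNat := by
      have : (board.reverse.take m.toNat)[r]'(by rw [List.length_take]; omega) = board.reverse[r] :=
        List.getElem_take
      rw [← this]
      exact List.getElem_mem _
    have hslen := hrows _ hs
    rw [PySem.Str.len_eq] at hslen
    have hclen : c < board.reverse[r].toList.length := by omega
    -- LHS cell
    rw [getD_map_range _ _ _ _ hr, getD_map_range _ _ _ _ hc]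
    -- RHS column entry
    rw [getD_map_range _ _ _ _ hc, getElem?_map_range _ _ _ hr]
    -- both sides are the same board character
    rw [PySem.List.pyGet?_natCast, List.getElem?_eq_getElem hblen, Option.bind_some,
       PySem.Str.pyGet?_natCast, List.getElem?_eq_getElem hclen]
    unfold vA
    rw [PySem.List.pyGet?_natCast, List.getElem?_eq_getElem hblen, Option.bind_some,
       PySem.Str.pyGet?_natCast, List.getElem?_eq_getElem hclen]
    rfl

theorem loop_eq (m n : Int) : ∀ (fuel : Nat) (st : List (List Char)) (g : List (List (Option Char))) (ans : Int),
    StRel m n st g → loopA fuel st ans = loopB m n fuel g ans := by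
  intro fuel
  induction fuel with
  | zero => intro st g ans h; rfl
  | succ fuel ih =>
    intro st g ans h
    show (if scanA st = [] then ans
          else loopA fuel (modifyA st (scanA st)) (ans + ((scanA st).length : Int)))
        = (if scanB m n g = [] then ans
          else loopB m n fuel (gravityB m n (scanB m n g) g) (ans + ((scanB m n g).length : Int)))
    by_cases he : scanA st = []
    · rw [if_pos he, if_pos ((scan_nil_iff m n st g h).2 he)]
    · rw [if_neg he, if_neg (fun hb => he ((scan_nil_iff m n st g h).1 hb))]
      rw [show ((scanB m n g).length : Int) = ((scanA st).length : Int) from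
        congrArg _ (scan_len_eq m n st g h)]
      exact ih _ _ _ (gravity_rel m n st g h)

-- on a degenerate board (m ≤ 0 or n ≤ 0) A's first scan finds nothing and A returns 0
theorem scanA_degenerate (m n : Int) (board : List String) (hdeg : m ≤ 0 ∨ n ≤ 0) :
    scanA (buildA m n board) = [] := by
  rw [List.eq_nil_iff_forall_not_mem]
  intro x hx
  rcases (mem_scanA _ x).1 hx with ⟨i, j, ⟨hi0, hj0, hilen, hjA, _, _⟩, _⟩
  rcases hdeg with hm | hn
  · rw [colA_nonneg _ i hi0, buildA_eq] at hjA
    have hlen0 : (((List.range n.toNat).map (fun i => (List.range m.toNat).map (fun j => vA board.reverse ((j : Nat) : Int) ((i : Nat) : Int)))).getD i.toNat []).length = 0 := by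
      by_cases hi : i.toNat < n.toNat
      · rw [getD_map_range _ _ _ _ hi]
        simp [show m.toNat = 0 by omega]
      · rw [List.getD_eq_default _ _ (by simp only [List.length_map, List.length_range]; omega)]
        rfl
    omega
  · rw [buildA_eq] at hilen
    have : n.toNat = 0 := by omega
    rw [this] at hilen
    simp at hilen
    omega

-- ===== VERDICT (by name: the statement is the Claim_ definition above) =====
theorem solution_spec : Claim_equal_solution := by
  intro m n board _ hpre
  unfold Spec_solution solution solution_alt
  by_cases hdeg : m ≤ 0 ∨ n ≤ 0
  · rw [if_pos hdeg]
    show (if scanA (buildA m n board) = [] then (0:Int)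
          else loopA (m.toNat * n.toNat) (modifyA (buildA m n board) (scanA (buildA m n board)))
            (0 + ((scanA (buildA m n board)).length : Int))) = 0
    rw [if_pos (scanA_degenerate m n board hdeg)]
  · rw [if_neg hdeg]
    exact loop_eq m n _ _ _ 0 (init_rel m n board hpre)
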